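-- pv_equiv track=rewrite | github.com/Jeiyoon/python-algorithm | programmers/level2/072222_word_relay.py | solution
-- ===== SOURCE A (Python) =====
-- from typing import List
--
-- def solution(n: int, words: List[str]) -> List[int]:
--   # The number of participants in the word relay "n" is a natural number between 2 and 10.
--   # The length of the words is between 2 and 50.
--   # "words" is an array containing words said in the word relay and its length is more than "n" and less than 100.
--
--   # If there is no dropout with the given words, return [0, 0].
--   appeared_words = []
--
--   # (1) appeared words
--   for idx, word in enumerate(words):
--     if len(appeared_words) == 0:
--       appeared_words.append(word)
--       continue
--
--     if word in appeared_words: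
--       return [(idx % n) + 1, (idx // n) + 1]
--
--     appeared_words.append(word)
--
--   # (2) no relayed word
--   for idx in range(len(words)):
--     if idx == 0:
--       continue
--
--     if words[idx-1][-1] != words[idx][0]:
--       return [(idx % n) + 1, (idx // n) + 1]
--
--   # Return an answer in [ number, turn ] format.
--   return [0, 0]
-- ===== SOURCE B (Python) =====
-- from typing import List
--
-- def solution(n: int, words: List[str]) -> List[int]:
--     # Single left-to-right pass: maintain a seen-set and two sentinel indices
--     # (first duplicate, first chain mismatch); duplicates outrank mismatches.
--     seen = set()
--     dup = None
--     mism = None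
--     for i, w in enumerate(words):
--         if dup is None and w in seen:
--             dup = i
--         seen.add(w)
--         if mism is None and i > 0 and words[i - 1][-1:] != w[:1]:
--             mism = i
--     idx = dup if dup is not None else mism
--     if idx is None:
--         return [0, 0]
--     return [(idx % n) + 1, (idx // n) + 1]
-- ===== Notes on version B (the rewrite author's own statement) =====
-- stated objective: alternative
-- what changed: A's two sequential early-return loops (duplicate scan with O(k) list membership, then mismatch scan) become one left-to-right pass that maintains a seen-set and two sentinel indices (first duplicate, first slice-based mismatch) and picks duplicate-over-mismatch after the loop.
import Mathlib
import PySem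

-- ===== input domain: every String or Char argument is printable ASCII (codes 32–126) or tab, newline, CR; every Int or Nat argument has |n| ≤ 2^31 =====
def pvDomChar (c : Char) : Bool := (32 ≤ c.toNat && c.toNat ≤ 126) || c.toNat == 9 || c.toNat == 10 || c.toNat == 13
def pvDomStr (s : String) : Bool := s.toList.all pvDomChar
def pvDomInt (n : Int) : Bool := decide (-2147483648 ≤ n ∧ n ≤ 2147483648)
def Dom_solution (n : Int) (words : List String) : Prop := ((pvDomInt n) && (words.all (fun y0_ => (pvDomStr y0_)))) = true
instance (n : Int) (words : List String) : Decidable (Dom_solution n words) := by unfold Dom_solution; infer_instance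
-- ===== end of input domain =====

-- B replaces A's two early-return loops by one pass keeping a seen-set and two sentinel
-- indices (first duplicate, first mismatch); alternative decomposition, same results.

-- ===== PORT A =====
-- loop (1): return [idx%n+1, idx//n+1] at the first repeated word, else fall through
def solutionLoop1 (n : Int) : List String → Int → List String → Option (List Int)
  | [], _, _ => none
  | w :: ws, idx, app =>
    if app.length = 0 then solutionLoop1 n ws (idx + 1) (app ++ [w])
    else if w ∈ app then
      some [PySem.Int.mod idx n + 1, PySem.Int.floordiv idx n + 1]
    else solutionLoop1 n ws (idx + 1) (app ++ [w])

-- loop (2): for idx in range(len(words)), skip 0, return at the first chain mismatch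
-- (words[idx-1][-1] / words[idx][0] ported via pyGetD/pyGet?; exact when no word is empty,
--  which Pre_solution guarantees — Python raises IndexError on an empty word)
def solutionLoop2 (n : Int) (words : List String) : List Int → List Int
  | [] => [0, 0]
  | idx :: rest =>
    if idx = 0 then solutionLoop2 n words rest
    else if PySem.Str.pyGet? (PySem.List.pyGetD words (idx - 1) "") (-1)
            ≠ PySem.Str.pyGet? (PySem.List.pyGetD words idx "") 0 then
      [PySem.Int.mod idx n + 1, PySem.Int.floordiv idx n + 1]
    else solutionLoop2 n words rest

def solution (n : Int) (words : List String) : List Int :=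
  match solutionLoop1 n words 0 [] with
  | some r => r
  | none => solutionLoop2 n words (PySem.List.pyRange 0 words.length 1)

-- ===== PORT B =====
-- one pass over enumerate(words): state (seen, dup, mism)
def solutionAltStep (words : List String)
    (st : PySem.Set String × Option Int × Option Int) (iw : Int × String) :
    PySem.Set String × Option Int × Option Int :=
  let dup' := if st.2.1 = none ∧ PySem.Set.contains st.1 iw.2 then some iw.1 else st.2.1
  let seen' := PySem.Set.add st.1 iw.2
  let mism' := if st.2.2 = none ∧ iw.1 > 0 ∧
      PySem.Str.slice (PySem.List.pyGetD words (iw.1 - 1) "") (some (-1)) none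
        ≠ PySem.Str.slice iw.2 none (some 1)
    then some iw.1 else st.2.2
  (seen', dup', mism')

def solution_alt (n : Int) (words : List String) : List Int :=
  let st := (PySem.List.enumerate words 0).foldl (solutionAltStep words)
    (PySem.Set.empty, none, none)
  let idx := match st.2.1 with
    | some d => some d
    | none => st.2.2
  match idx with
  | none => [0, 0]
  | some i => [PySem.Int.mod i n + 1, PySem.Int.floordiv i n + 1]

-- ===== PRECONDITION & SPEC =====
-- Python A raises at index i of the relay scan when a neighbouring word is empty, or on % by zero
def pvRaiseAt (words : List String) (i : Nat) : Bool :=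
  words.getD (i - 1) "" == "" || words.getD i "" == ""
-- a genuine relay mismatch at index i (both neighbours nonempty, last char ≠ first char)
def pvMisAt (words : List String) (i : Nat) : Bool :=
  !pvRaiseAt words i &&
    ((words.getD (i - 1) "").toList.getLast? != (words.getD i "").toList.head?)
-- Pre_ is exactly A's return domain: it excludes n = 0 whenever a dropout would be reported
-- (ZeroDivisionError) and duplicate-free inputs whose first relay break involves an
-- empty word (''[-1] / ''[0] raise IndexError); it excludes no input on which A returns.
def Pre_solution (n : Int) (words : List String) : Prop :=
  (¬ words.Nodup → n ≠ 0) ∧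
  (words.Nodup → ∀ i < words.length, 1 ≤ i →
    (∀ j < i, 1 ≤ j → ¬ (pvRaiseAt words j || pvMisAt words j) = true) →
    pvRaiseAt words i = false ∧ (pvMisAt words i = true → n ≠ 0))
instance (n : Int) (words : List String) : Decidable (Pre_solution n words) := by
  unfold Pre_solution; infer_instance
def pvWitness_solution : Int × List String := (2, ["ab", "bc", "cd"])

def Spec_solution (n : Int) (words : List String) (out : List Int) : Prop := out = solution_alt n words
instance (n : Int) (words : List String) (out : List Int) : Decidable (Spec_solution n words out) := by unfold Spec_solution; infer_instance

-- ===== CLAIM (what is proved, stated in full; the proofs are below) =====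
def Claim_equal_solution : Prop := ∀ (n : Int) (words : List String), Dom_solution n words → Pre_solution n words → Spec_solution n words (solution n words)

-- ===== LEMMAS AND PROOFS =====

-- reference "first duplicate" search shared by both characterisations
def firstDup : List String → List (Int × String) → Option Int
  | _, [] => none
  | seen, (i, w) :: rest =>
    if PySem.Set.contains seen w then some i else firstDup (PySem.Set.add seen w) rest

-- reference "first mismatch" search
def firstMis (words : List String) : List (Int × String) → Option Int
  | [] => none
  | (i, w) :: rest =>
    if i > 0 ∧ PySem.Str.slice (PySem.List.pyGetD words (i - 1) "") (some (-1)) none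
        ≠ PySem.Str.slice w none (some 1) then some i
    else firstMis words rest

-- sticky-sentinel shape: feeding "if c then some i else none" into dup/mism's match
theorem match_if_opt {c : Prop} [Decidable c] (i : Int) (x : Option Int) :
    (match (if c then some i else none) with | some d => some d | none => x) =
      if c then some i else x := by
  split_ifs <;> rfl

-- B's fold, characterised: seen collects the words, dup/mism are sticky sentinels
theorem foldl_step_char (words : List String) :
    ∀ (l : List (Int × String)) (seen : PySem.Set String) (dup mism : Option Int),
    l.foldl (solutionAltStep words) (seen, dup, mism) =
      (PySem.Set.update seen (l.map Prod.snd),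
       (match dup with | some d => some d | none => firstDup seen l),
       (match mism with | some m => some m | none => firstMis words l)) := by
  intro l
  induction l with
  | nil => intro seen dup mism; cases dup <;> cases mism <;>
      simp [PySem.Set.update, firstDup, firstMis]
  | cons iw rest ih =>
    intro seen dup mism
    obtain ⟨i, w⟩ := iw
    simp only [List.foldl_cons, ih]
    cases dup <;> cases mism <;>
      simp [solutionAltStep, firstDup, firstMis, PySem.Set.update, match_if_opt]

-- A's first loop is the firstDup search (formatted)
theorem loop1_char (n : Int) :
    ∀ (ws : List String) (idx : Int) (app : List String), app.Nodup →
    solutionLoop1 n ws idx app =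
      (firstDup app (PySem.List.enumerate ws idx)).map
        (fun i => [PySem.Int.mod i n + 1, PySem.Int.floordiv i n + 1]) := by
  intro ws
  induction ws with
  | nil => intro idx app _; simp [solutionLoop1, PySem.List.enumerate, firstDup]
  | cons w ws ih =>
    intro idx app hnd
    rw [PySem.List.enumerate_cons]
    by_cases h0 : app.length = 0
    · have : app = [] := List.length_eq_zero_iff.mp h0
      subst this
      simp [solutionLoop1, firstDup, PySem.Set.contains, PySem.Set.add,
        ih (idx + 1) [w] (by simp)]
    · by_cases hmem : w ∈ app
      · simp [solutionLoop1, h0, hmem, firstDup, PySem.Set.contains]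
      · have hnd' : (app ++ [w]).Nodup := by
          simp [List.nodup_append, hnd]
          intro a ha h
          exact hmem (h ▸ ha)
        simp [solutionLoop1, h0, hmem, firstDup, PySem.Set.contains, PySem.Set.add,
          ih (idx + 1) (app ++ [w]) hnd']

-- B's slice test  words[i-1][-1:] != w[:1]  agrees with A's char test on every string
theorem slice_last (l : List Char) :
    PySem.List.slice l (some (-1)) none = (l.getLast?).elim [] ([·]) := by
  rcases List.eq_nil_or_concat l with rfl | ⟨ys, y, rfl⟩
  · decide
  · simp [PySem.List.slice]

theorem slice_head (l : List Char) :
    PySem.List.slice l none (some 1) = (l.head?).elim [] ([·]) := by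
  cases l with
  | nil => decide
  | cons x xs => simp [PySem.List.slice]

theorem pyget_last (l : List Char) : PySem.List.pyGet? l (-1) = l.getLast? := by
  rcases List.eq_nil_or_concat l with rfl | ⟨ys, y, rfl⟩
  · decide
  · simp [PySem.List.pyGet?, PySem.List.pyIdx?]

theorem pyget_head (l : List Char) : PySem.List.pyGet? l 0 = l.head? := by
  cases l with
  | nil => decide
  | cons x xs => simp [PySem.List.pyGet?, PySem.List.pyIdx?]

theorem slice_cond_iff (s t : String) :
    (PySem.Str.slice s (some (-1)) none = PySem.Str.slice t none (some 1)) ↔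
      (PySem.Str.pyGet? s (-1) = PySem.Str.pyGet? t 0) := by
  rw [← String.toList_inj]
  simp [PySem.Str.toList_slice, slice_last, slice_head, pyget_last, pyget_head]
  cases s.toList.getLast? <;> cases t.toList.head? <;> simp

-- A's second loop is the firstMis search (formatted), over nonnegative indices
theorem loop2_char (n : Int) (words : List String) :
    ∀ (idxs : List Int), (∀ i ∈ idxs, 0 ≤ i) →
    solutionLoop2 n words idxs =
      (match firstMis words (idxs.map (fun j => (j, PySem.List.pyGetD words j ""))) with
       | some i => [PySem.Int.mod i n + 1, PySem.Int.floordiv i n + 1]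
       | none => [0, 0]) := by
  intro idxs
  induction idxs with
  | nil => intro _; simp [solutionLoop2, firstMis]
  | cons idx rest ih =>
    intro hpos
    have ihr := ih (fun i hi => hpos i (by simp [hi]))
    by_cases h0 : idx = 0
    · subst h0
      simp [solutionLoop2, firstMis, slice_cond_iff, ihr]
    · have hgt : idx > 0 := lt_of_le_of_ne (hpos idx (by simp)) (Ne.symm h0)
      simp [solutionLoop2, firstMis, slice_cond_iff, h0, hgt, ihr]
      split <;> simp

theorem solution_spec : Claim_equal_solution := by
  intro n words _ _
  unfold Spec_solution solution solution_alt
  rw [foldl_step_char words (PySem.List.enumerate words 0) PySem.Set.empty none none]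
  rw [loop1_char n words 0 [] (by simp)]
  have henum : PySem.List.enumerate words 0 =
      (PySem.List.pyRange 0 (words.length : Int) 1).map
        (fun j => (j, PySem.List.pyGetD words j "")) :=
    PySem.List.enumerate_eq_map_pyRange words ""
  rw [loop2_char n words (PySem.List.pyRange 0 (words.length : Int) 1)
    (fun i hi => by
      have := (PySem.List.mem_pyRange_one (a := 0) (b := (words.length : Int)) (x := i)).mp hi
      omega)]
  rw [← henum]
  have hempty : (PySem.Set.empty : PySem.Set String) = [] := rfl
  rw [hempty]
  cases hd : firstDup [] (PySem.List.enumerate words 0) <;>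
    cases hm : firstMis words (PySem.List.enumerate words 0) <;> simp
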